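-- pv_equiv track=rewrite | github.com/slostett/Code-Samples-MIT | lab5/SAT Solver.py | trim_formula
-- ===== SOURCE A (Python) =====
-- def trim_formula(formula, var, bool):
--     '''
--     :param formula: formula in given format
--     :param var: string variable id
--     :param bool: bool to trim based on matching
--     :return: return formula trimmed based on given var, bool
--     '''
--     new_formula = []
--
--     for clause in formula:
--
--         new_clause = []
--         append_clause = True
--
--         for literal in clause:
--             if literal[0] == var:
--                 if literal[1] == bool:
--                     append_clause = False
--                     break
--             else:
--                 new_clause.append(literal)
--
--         if append_clause:
--             new_formula.append(new_clause)
--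
--     return new_formula
-- ===== SOURCE B (Python) =====
-- def trim_formula(formula, var, bool):
--     '''Recursive: trims the tail first, then decides the head clause by
--     tuple membership of the assigned literal.'''
--     if not formula:
--         return []
--     rest = trim_formula(formula[1:], var, bool)
--     clause = formula[0]
--     if (var, bool) in clause:
--         return rest
--     return [_strip(clause, var)] + rest
--
-- def _strip(clause, var):
--     if not clause:
--         return []
--     head = clause[0]
--     tail = _strip(clause[1:], var)
--     if head[0] == var:
--         return tail
--     return [head] + tail
-- ===== Notes on version B (the rewrite author's own statement) =====
-- stated objective: alternative
-- what changed: Replaced A's iterative accumulator loop with break/flag bookkeeping by structural recursion on the formula that builds the result back-to-front, deciding each clause by a tuple membership test (var, bool) in clause and stripping literals with a separate recursive helper.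
import Mathlib
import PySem

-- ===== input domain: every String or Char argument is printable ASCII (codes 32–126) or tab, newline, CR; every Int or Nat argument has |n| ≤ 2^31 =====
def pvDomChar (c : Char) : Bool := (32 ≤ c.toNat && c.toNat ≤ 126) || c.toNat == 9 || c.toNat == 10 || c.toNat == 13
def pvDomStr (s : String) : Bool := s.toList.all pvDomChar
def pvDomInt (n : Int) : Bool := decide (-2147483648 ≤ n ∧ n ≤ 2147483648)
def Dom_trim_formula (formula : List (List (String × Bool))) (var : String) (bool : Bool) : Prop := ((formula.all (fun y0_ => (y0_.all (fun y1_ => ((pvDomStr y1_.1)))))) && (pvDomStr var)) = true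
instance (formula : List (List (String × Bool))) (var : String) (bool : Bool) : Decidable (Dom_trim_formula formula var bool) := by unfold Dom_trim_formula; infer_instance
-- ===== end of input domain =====

-- B replaces A's iterative flag/accumulator loop by structural recursion building the result back-to-front, with a tuple-membership test per clause (alternative decomposition; same cost).
-- ===== PORT A =====
-- inner loop of A over one clause: none on break (clause satisfied), else the accumulated new_clause
def pvTrimClauseA (var : String) (bool : Bool) : List (String × Bool) → List (String × Bool) → Option (List (String × Bool))
  | [], acc => some acc
  | lit :: rest, acc =>
    if lit.1 = var then
      if lit.2 = bool then none
      else pvTrimClauseA var bool rest acc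
    else pvTrimClauseA var bool rest (acc ++ [lit])

def trim_formula (formula : List (List (String × Bool))) (var : String) (bool : Bool) : List (List (String × Bool)) :=
  formula.foldl (fun nf clause =>
    match pvTrimClauseA var bool clause [] with
    | none => nf
    | some nc => nf ++ [nc]) []

-- ===== PORT B =====
-- recursive helper _strip
def pvStripB (var : String) : List (String × Bool) → List (String × Bool)
  | [] => []
  | head :: tail =>
    let t := pvStripB var tail
    if head.1 = var then t else head :: t

def trim_formula_alt (formula : List (List (String × Bool))) (var : String) (bool : Bool) : List (List (String × Bool)) :=
  match formula with
  | [] => []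
  | clause :: tl =>
    let rest := trim_formula_alt tl var bool
    if clause.contains (var, bool) then rest
    else pvStripB var clause :: rest

-- ===== PRECONDITION & SPEC =====
def Spec_trim_formula (formula : List (List (String × Bool))) (var : String) (bool : Bool) (out : List (List (String × Bool))) : Prop := out = trim_formula_alt formula var bool
instance (formula : List (List (String × Bool))) (var : String) (bool : Bool) (out : List (List (String × Bool))) : Decidable (Spec_trim_formula formula var bool out) := by unfold Spec_trim_formula; infer_instance

-- ===== CLAIM (what is proved, stated in full; the proofs are below) =====
def Claim_equal_trim_formula : Prop := ∀ (formula : List (List (String × Bool))) (var : String) (bool : Bool), Dom_trim_formula formula var bool → Spec_trim_formula formula var bool (trim_formula formula var bool)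

-- ===== LEMMAS AND PROOFS =====

-- ===== VERDICT (by name: the statement is the Claim_ definition above) =====
lemma pvTrimClauseA_eq (var : String) (bool : Bool) (clause : List (String × Bool)) :
    ∀ acc, pvTrimClauseA var bool clause acc =
      if clause.contains (var, bool) then none
      else some (acc ++ pvStripB var clause) := by
  induction clause with
  | nil => intro acc; simp [pvTrimClauseA, pvStripB]
  | cons lit rest ih =>
    intro acc
    by_cases h1 : lit.1 = var
    · by_cases h2 : lit.2 = bool
      · simp [pvTrimClauseA, h1, h2, Prod.ext_iff]
      · have : lit ≠ (var, bool) := by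
          intro h; exact h2 (by rw [h])
        simp [pvTrimClauseA, h1, h2, ih, pvStripB, Ne.symm this]
    · have : lit ≠ (var, bool) := by
        intro h; exact h1 (by rw [h])
      simp [pvTrimClauseA, h1, ih, pvStripB, Ne.symm this]

lemma pvFold_eq (var : String) (bool : Bool) (formula : List (List (String × Bool))) :
    ∀ nf, formula.foldl (fun nf clause =>
      match pvTrimClauseA var bool clause [] with
      | none => nf
      | some nc => nf ++ [nc]) nf
    = nf ++ trim_formula_alt formula var bool := by
  induction formula with
  | nil => intro nf; simp [trim_formula_alt]
  | cons clause rest ih =>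
    intro nf
    simp only [List.foldl_cons]
    rw [pvTrimClauseA_eq]
    by_cases h : clause.contains (var, bool)
    · simp only [h, if_true]
      rw [ih]
      simp only [trim_formula_alt]
      rw [if_pos h]
    · simp only [h, if_false]
      rw [ih]
      simp only [trim_formula_alt]
      simp [h]
      exact fun hm => h (by simpa using hm)

theorem trim_formula_spec : Claim_equal_trim_formula := by
  intro formula var bool _
  unfold Spec_trim_formula trim_formula
  simpa using pvFold_eq var bool formula []
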